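-- pv_equiv track=rewrite | github.com/jed-thompson/graph_kb | graph_kb_api/graph_kb/processing/chunker.py | _find_uncovered_ranges
-- ===== SOURCE A (Python) =====
-- from typing import List, Optional, Tuple
--
-- def _find_uncovered_ranges(
--     total_lines: int, covered_lines: set
-- ) -> List[Tuple[int, int]]:
--     """Find line ranges not covered by function chunks."""
--     ranges = []
--     start = None
--
--     for i in range(total_lines):
--         if i not in covered_lines:
--             if start is None:
--                 start = i
--         else:
--             if start is not None:
--                 ranges.append((start, i))
--                 start = None
--
--     if start is not None:
--         ranges.append((start, total_lines))
--
--     return ranges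
-- ===== SOURCE B (Python) =====
-- from typing import List, Tuple
--
-- def _find_uncovered_ranges(
--     total_lines: int, covered_lines: set
-- ) -> List[Tuple[int, int]]:
--     """Find line ranges not covered by function chunks."""
--     ranges = []
--     prev = 0
--     for c in sorted(x for x in covered_lines if 0 <= x < total_lines):
--         if prev < c:
--             ranges.append((prev, c))
--         prev = c + 1
--     if prev < total_lines:
--         ranges.append((prev, total_lines))
--     return ranges
-- ===== Notes on version B (the rewrite author's own statement) =====
-- stated objective: alternative
-- what changed: Instead of scanning every line index 0..total_lines-1 with an open-range state machine, B sorts the in-range covered lines and emits the gaps between consecutive covered indices plus the boundary gaps.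
import Mathlib
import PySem

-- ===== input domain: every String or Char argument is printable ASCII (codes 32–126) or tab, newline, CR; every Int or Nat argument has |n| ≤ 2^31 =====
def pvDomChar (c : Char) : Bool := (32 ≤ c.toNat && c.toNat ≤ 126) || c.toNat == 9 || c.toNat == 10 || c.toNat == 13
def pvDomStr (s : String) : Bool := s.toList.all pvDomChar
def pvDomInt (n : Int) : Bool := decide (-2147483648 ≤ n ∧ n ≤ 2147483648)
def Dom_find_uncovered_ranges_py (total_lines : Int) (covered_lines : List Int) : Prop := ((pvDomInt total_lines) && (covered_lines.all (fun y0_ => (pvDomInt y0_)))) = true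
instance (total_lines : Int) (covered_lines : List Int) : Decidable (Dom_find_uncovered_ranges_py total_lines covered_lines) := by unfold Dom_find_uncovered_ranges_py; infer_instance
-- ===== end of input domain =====

-- B replaces A's per-line-index scan with an open-range state machine by sorting the
-- in-range covered lines and emitting the gaps between consecutive covered indices (objective: alternative).

-- ===== PORT A =====
-- Python A: scan i = 0..total_lines-1, keep an optional open-range start, close a range
-- when hitting a covered line, flush the open range at the end.
def find_uncovered_ranges_py (total_lines : Int) (covered_lines : List Int) : List (Int × Int) :=
  let st := (PySem.List.pyRange 0 total_lines 1).foldl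
    (fun (s : List (Int × Int) × Option Int) i =>
      if !(covered_lines.contains i) then
        (if s.2.isNone then (s.1, some i) else s)
      else
        match s.2 with
        | some a => (s.1 ++ [(a, i)], none)
        | none => s)
    ([], none)
  match st.2 with
  | some a => st.1 ++ [(a, total_lines)]
  | none => st.1

-- ===== PORT B =====
-- B: sort the covered lines that lie in [0, total_lines); fold over them emitting the
-- gap before each and advancing prev; flush the final gap up to total_lines.
def find_uncovered_ranges_py_alt (total_lines : Int) (covered_lines : List Int) : List (Int × Int) :=
  let cov := PySem.List.sorted
    (covered_lines.filter (fun x => decide (0 ≤ x) && decide (x < total_lines)))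
    (fun x => x) false
  let st := cov.foldl
    (fun (s : List (Int × Int) × Int) c =>
      (if s.2 < c then s.1 ++ [(s.2, c)] else s.1, c + 1))
    ([], 0)
  if st.2 < total_lines then st.1 ++ [(st.2, total_lines)] else st.1

-- ===== PRECONDITION & SPEC =====
def Spec_find_uncovered_ranges_py (total_lines : Int) (covered_lines : List Int) (out : List (Int × Int)) : Prop := out = find_uncovered_ranges_py_alt total_lines covered_lines
instance (total_lines : Int) (covered_lines : List Int) (out : List (Int × Int)) : Decidable (Spec_find_uncovered_ranges_py total_lines covered_lines out) := by unfold Spec_find_uncovered_ranges_py; infer_instance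

-- ===== CLAIM (what is proved, stated in full; the proofs are below) =====
def Claim_equal_find_uncovered_ranges_py : Prop := ∀ (total_lines : Int) (covered_lines : List Int), Dom_find_uncovered_ranges_py total_lines covered_lines → Spec_find_uncovered_ranges_py total_lines covered_lines (find_uncovered_ranges_py total_lines covered_lines)

-- ===== LEMMAS AND PROOFS =====

-- proof-side names for the two fold bodies
def pvStepA (cov : List Int) (s : List (Int × Int) × Option Int) (i : Int) : List (Int × Int) × Option Int :=
  if !(cov.contains i) then
    (if s.2.isNone then (s.1, some i) else s)
  else
    match s.2 with
    | some a => (s.1 ++ [(a, i)], none)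
    | none => s

def pvStepB (s : List (Int × Int) × Int) (c : Int) : List (Int × Int) × Int :=
  (if s.2 < c then s.1 ++ [(s.2, c)] else s.1, c + 1)

def pvFilt (t : Int) (l : List Int) : List Int :=
  l.filter (fun x => decide (0 ≤ x) && decide (x < t))

def pvSortB (t : Int) (l : List Int) : List Int :=
  PySem.List.sorted (pvFilt t l) (fun x => x) false

def pvStA (n : Int) (cov : List Int) : List (Int × Int) × Option Int :=
  (PySem.List.pyRange 0 n 1).foldl (pvStepA cov) ([], none)

def pvStB (n : Int) (cov : List Int) : List (Int × Int) × Int :=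
  (pvSortB n cov).foldl pvStepB ([], 0)

lemma pvA_eq (t : Int) (l : List Int) :
    find_uncovered_ranges_py t l =
      match (pvStA t l).2 with
      | some a => (pvStA t l).1 ++ [(a, t)]
      | none => (pvStA t l).1 := rfl

lemma pvB_eq (t : Int) (l : List Int) :
    find_uncovered_ranges_py_alt t l =
      if (pvStB t l).2 < t then (pvStB t l).1 ++ [((pvStB t l).2, t)] else (pvStB t l).1 := rfl

lemma pvFilt_nonpos (t : Int) (l : List Int) (h : t ≤ 0) : pvFilt t l = [] := by
  unfold pvFilt
  rw [List.filter_eq_nil_iff]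
  intro x _
  simp only [Bool.and_eq_true, decide_eq_true_eq, not_and]
  intro h0
  omega

-- the in-range filter for bound n+1 is a permutation of the filter for bound n plus the copies of n
lemma pvFilt_succ_perm (n : Nat) (l : List Int) :
    (pvFilt ((n : Int) + 1) l).Perm (pvFilt (n : Int) l ++ l.filter (fun x => x == (n : Int))) := by
  induction l with
  | nil => simp [pvFilt]
  | cons x t ih =>
    simp only [pvFilt, List.filter_cons] at *
    by_cases h1 : 0 ≤ x ∧ x < (n : Int)
    · have hp1 : (decide (0 ≤ x) && decide (x < (n : Int) + 1)) = true := by simp; omega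
      have hp0 : (decide (0 ≤ x) && decide (x < (n : Int))) = true := by simp; omega
      have hne : (x == (n : Int)) = false := by simp; omega
      simp only [hp1, hp0, hne, if_true, Bool.false_eq_true, if_false]
      simpa using ih.cons x
    · by_cases h2 : x = (n : Int)
      · have hp1 : (decide (0 ≤ x) && decide (x < (n : Int) + 1)) = true := by simp; omega
        have hp0 : (decide (0 ≤ x) && decide (x < (n : Int))) = false := by simp; omega
        have heq : (x == (n : Int)) = true := by simpa using h2
        simp only [hp1, hp0, heq, if_true, Bool.false_eq_true, if_false]
        exact (ih.cons x).trans (List.perm_middle).symm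
      · have hp1 : (decide (0 ≤ x) && decide (x < (n : Int) + 1)) = false := by simp; omega
        have hp0 : (decide (0 ≤ x) && decide (x < (n : Int))) = false := by simp; omega
        have hne : (x == (n : Int)) = false := by simpa using h2
        simp only [hp1, hp0, hne, Bool.false_eq_true, if_false]
        exact ih

lemma pvSortB_succ (n : Nat) (l : List Int) :
    pvSortB ((n : Int) + 1) l = pvSortB (n : Int) l ++ l.filter (fun x => x == (n : Int)) := by
  unfold pvSortB
  apply PySem.List.sorted_id_eq_of_perm_of_pairwise
  · exact ((PySem.List.sorted_perm (pvFilt (n : Int) l) (fun x => x) false).append_right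
      (l.filter (fun x => x == (n : Int)))).trans (pvFilt_succ_perm n l).symm
  · rw [List.pairwise_append]
    refine ⟨PySem.List.sorted_pairwise _ _, ?_, ?_⟩
    · apply List.pairwise_of_forall_mem_list
      intro a ha b hb
      have ha' : (a == (n : Int)) = true := (List.mem_filter.mp ha).2
      have hb' : (b == (n : Int)) = true := (List.mem_filter.mp hb).2
      simp only [beq_iff_eq] at ha' hb'
      omega
    · intro a ha b hb
      have ha' : a ∈ pvFilt (n : Int) l := (PySem.List.mem_sorted _ _ _ _).mp ha
      have ha'' : (decide (0 ≤ a) && decide (a < (n : Int))) = true := (List.mem_filter.mp ha').2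
      have hb' : (b == (n : Int)) = true := (List.mem_filter.mp hb).2
      simp only [Bool.and_eq_true, decide_eq_true_eq] at ha''
      simp only [beq_iff_eq] at hb'
      omega

-- folding pvStepB over a list whose elements are all n, starting at prev = n+1, does nothing
lemma pvStepB_const_tail (n : Int) (xs : List Int) (r : List (Int × Int))
    (h : ∀ x ∈ xs, x = n) :
    xs.foldl pvStepB (r, n + 1) = (r, n + 1) := by
  induction xs with
  | nil => rfl
  | cons x t ih =>
    have hx := h x (by simp)
    subst hx
    simp only [List.foldl_cons, pvStepB]
    rw [if_neg (by omega : ¬ (x + 1 < x))]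
    exact ih (fun y hy => h y (by simp [hy]))

-- folding pvStepB over a nonempty all-n list from prev ≤ n emits the gap (prev, n) if any
lemma pvStepB_const (n : Int) (x : Int) (xs : List Int) (s : List (Int × Int) × Int)
    (hp : s.2 ≤ n) (h : ∀ y ∈ x :: xs, y = n) :
    (x :: xs).foldl pvStepB s =
      (if s.2 < n then s.1 ++ [(s.2, n)] else s.1, n + 1) := by
  have hx := h x (by simp)
  subst hx
  simp only [List.foldl_cons, pvStepB]
  by_cases hlt : s.2 < x
  · rw [if_pos hlt]
    exact pvStepB_const_tail x xs _ (fun y hy => h y (by simp [hy]))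
  · rw [if_neg hlt]
    exact pvStepB_const_tail x xs _ (fun y hy => h y (by simp [hy]))

-- the invariant tying A's scan state to B's gap state
lemma pvInv (cov : List Int) (n : Nat) :
    (pvStA (n : Int) cov).1 = (pvStB (n : Int) cov).1 ∧
    (pvStA (n : Int) cov).2 =
      (if (pvStB (n : Int) cov).2 < (n : Int) then some (pvStB (n : Int) cov).2 else none) ∧
    0 ≤ (pvStB (n : Int) cov).2 ∧ (pvStB (n : Int) cov).2 ≤ (n : Int) := by
  induction n with
  | zero =>
    have hA : pvStA 0 cov = ([], none) := by
      simp [pvStA, PySem.List.pyRange_one_eq_nil (by omega : (0:Int) ≤ 0)]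
    have hB : pvStB 0 cov = ([], 0) := by
      simp [pvStB, pvSortB, pvFilt_nonpos 0 cov (le_refl 0), PySem.List.sorted]
    simp only [Nat.cast_zero, hA, hB]
    simp
  | succ n ih =>
    obtain ⟨ih1, ih2, ih3, ih4⟩ := ih
    have hA : pvStA ((n : Int) + 1) cov = pvStepA cov (pvStA (n : Int) cov) (n : Int) := by
      simp [pvStA, PySem.List.pyRange_one_succ_right (by positivity : (0:Int) ≤ (n : Int))]
    have hB : pvStB ((n : Int) + 1) cov =
        (cov.filter (fun x => x == (n : Int))).foldl pvStepB (pvStB (n : Int) cov) := by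
      simp only [pvStB]
      rw [pvSortB_succ n cov, List.foldl_append]
    push_cast
    rw [hA, hB]
    by_cases hc : (n : Int) ∈ cov
    · -- line n is covered: A closes the open range, B emits the gap and advances
      have hfil : ∃ x xs, cov.filter (fun x => x == (n : Int)) = x :: xs := by
        have hm : (n : Int) ∈ cov.filter (fun x => x == (n : Int)) :=
          List.mem_filter.mpr ⟨hc, by simp⟩
        cases hf : cov.filter (fun x => x == (n : Int)) with
        | nil => rw [hf] at hm; simp at hm
        | cons x xs => exact ⟨x, xs, rfl⟩
      obtain ⟨x, xs, hf⟩ := hfil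
      have hall : ∀ y ∈ x :: xs, y = (n : Int) := by
        intro y hy
        have : y ∈ cov.filter (fun z => z == (n : Int)) := by rw [hf]; exact hy
        simpa using (List.of_mem_filter this)
      rw [hf, pvStepB_const (n : Int) x xs _ ih4 hall]
      have hcontains : cov.contains (n : Int) = true := by simpa using hc
      simp only [pvStepA, hcontains, Bool.not_true, Bool.false_eq_true, if_false]
      rw [ih2]
      have hno : ¬ ((n : Int) + 1 < (n : Int) + 1) := by omega
      by_cases hlt : (pvStB (n : Int) cov).2 < (n : Int)
      · refine ⟨?_, ?_, by omega, by simp⟩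
        · simp [hlt, ih1]
        · simp [hlt]
      · refine ⟨?_, ?_, by omega, by simp⟩
        · simp [hlt, ih1]
        · simp [ih2, hlt]
    · -- line n is uncovered: A opens (or keeps) a range, B is unchanged
      have hfil : cov.filter (fun x => x == (n : Int)) = [] := by
        rw [List.filter_eq_nil_iff]
        intro y hy hyn
        have : y = (n : Int) := by simpa using hyn
        exact hc (this ▸ hy)
      rw [hfil]
      simp only [List.foldl_nil]
      have hcontains : cov.contains (n : Int) = false := by simpa using hc
      simp only [pvStepA, hcontains, Bool.not_false, if_true]
      rw [ih2]
      have hsn : (pvStB (n : Int) cov).2 < (n : Int) + 1 := by omega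
      by_cases hlt : (pvStB (n : Int) cov).2 < (n : Int)
      · rw [if_pos hlt]
        simp only [Option.isNone_some, Bool.false_eq_true, if_false]
        refine ⟨ih1, ?_, by omega, by omega⟩
        rw [ih2, if_pos hlt, if_pos hsn]
      · rw [if_neg hlt]
        simp only [Option.isNone_none, if_true]
        have hpn : (pvStB (n : Int) cov).2 = (n : Int) := by omega
        refine ⟨ih1, ?_, by omega, by omega⟩
        rw [if_pos hsn, hpn]

-- ===== VERDICT (by name: the statement is the Claim_ definition above) =====
theorem find_uncovered_ranges_py_spec : Claim_equal_find_uncovered_ranges_py := by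
  intro t cov _
  unfold Spec_find_uncovered_ranges_py
  rw [pvA_eq, pvB_eq]
  by_cases ht : t ≤ 0
  · have hA : pvStA t cov = ([], none) := by
      simp [pvStA, PySem.List.pyRange_one_eq_nil (by omega : t ≤ 0)]
    have hB : pvStB t cov = ([], 0) := by
      simp [pvStB, pvSortB, pvFilt_nonpos t cov ht, PySem.List.sorted]
    rw [hA, hB]
    simp [show ¬ ((0:Int) < t) by omega]
  · have hn : t = (t.toNat : Int) := by omega
    obtain ⟨h1, h2, _, _⟩ := pvInv cov t.toNat
    rw [hn, h1, h2]
    by_cases hlt : (pvStB ((t.toNat : Int)) cov).2 < (t.toNat : Int)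
    · rw [if_pos hlt, if_pos hlt]
    · rw [if_neg hlt, if_neg hlt]
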